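-- pv_equiv track=rewrite | github.com/ChiniBau/TOC | 6.py | nfa_starts_with_01
-- ===== SOURCE A (Python) =====
-- def nfa_starts_with_01(string):
--     current_states = {'q0'}
--
--     for char in string:
--         next_states = set()
--         for state in current_states:
--             if state == 'q0' and char == '0':
--                 next_states.add('q1')
--             elif state == 'q1' and char == '1':
--                 next_states.add('q2')
--             elif state == 'q2' and char in {'0', '1'}:
--                 next_states.add('q2')
--         current_states = next_states
--
--     return 'q2' in current_states
-- ===== SOURCE B (Python) =====
-- def nfa_starts_with_01(string):
--     if len(string) < 2:
--         return False
--     return (string[0] == '0' and string[1] == '1'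
--             and all(c in ('0', '1') for c in string[2:]))
-- ===== Notes on version B (the rewrite author's own statement) =====
-- stated objective: simpler
-- what changed: Replaced the per-character NFA state-set simulation with a closed-form membership predicate for the accepted language (length at least 2, the required two-character prefix, all remaining characters binary), checked with indexing and all().
import Mathlib
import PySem

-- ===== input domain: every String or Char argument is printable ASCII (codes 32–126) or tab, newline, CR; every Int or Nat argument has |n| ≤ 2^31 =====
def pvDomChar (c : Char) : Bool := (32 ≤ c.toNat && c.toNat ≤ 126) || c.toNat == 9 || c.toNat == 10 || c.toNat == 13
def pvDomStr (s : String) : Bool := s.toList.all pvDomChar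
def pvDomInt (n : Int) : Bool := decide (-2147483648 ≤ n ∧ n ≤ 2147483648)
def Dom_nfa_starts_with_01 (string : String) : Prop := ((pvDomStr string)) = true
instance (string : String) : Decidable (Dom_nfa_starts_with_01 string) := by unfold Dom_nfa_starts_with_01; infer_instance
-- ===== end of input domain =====

-- B replaces A's per-character NFA state-set simulation with a closed-form membership
-- check of the accepted language (objective: simpler).

-- ===== PORT A =====
-- inner 'for state in current_states' loop building next_states (iteration over a set;
-- the result is itself a set, so it is order-independent)
def nfaStep (current_states : PySem.Set String) (char : Char) : PySem.Set String :=
  current_states.foldl (fun next_states state =>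
    if state == "q0" && char == '0' then PySem.Set.add next_states "q1"
    else if state == "q1" && char == '1' then PySem.Set.add next_states "q2"
    else if state == "q2" && (char == '0' || char == '1') then PySem.Set.add next_states "q2"
    else next_states) PySem.Set.empty

def nfa_starts_with_01 (string : String) : Bool :=
  let final := string.toList.foldl nfaStep (PySem.Set.ofList ["q0"])
  PySem.Set.contains final "q2"

-- ===== PORT B =====
def nfa_starts_with_01_alt (string : String) : Bool :=
  let l := string.toList
  if l.length < 2 then false
  else (l[0]? == some '0') && (l[1]? == some '1')
       && (l.drop 2).all (fun c => c == '0' || c == '1')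

-- ===== PRECONDITION & SPEC =====
def Spec_nfa_starts_with_01 (string : String) (out : Bool) : Prop := out = nfa_starts_with_01_alt string
instance (string : String) (out : Bool) : Decidable (Spec_nfa_starts_with_01 string out) := by unfold Spec_nfa_starts_with_01; infer_instance

-- ===== CLAIM (what is proved, stated in full; the proofs are below) =====
def Claim_equal_nfa_starts_with_01 : Prop := ∀ (string : String), Dom_nfa_starts_with_01 string → Spec_nfa_starts_with_01 string (nfa_starts_with_01 string)

-- ===== LEMMAS AND PROOFS =====
theorem nfaStep_empty (c : Char) : nfaStep ([] : List String) c = [] := rfl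

theorem loop_empty (l : List Char) :
    l.foldl nfaStep ([] : List String) = [] := by
  induction l with
  | nil => rfl
  | cons c l ih => simpa [nfaStep] using ih

theorem nfaStep_q0 (c : Char) :
    nfaStep ["q0"] c = if c == '0' then ["q1"] else [] := by
  by_cases h : c = '0' <;>
    simp [nfaStep, PySem.Set.add, PySem.Set.contains, PySem.Set.empty, h]

theorem nfaStep_q1 (c : Char) :
    nfaStep ["q1"] c = if c == '1' then ["q2"] else [] := by
  by_cases h : c = '1' <;>
    simp [nfaStep, PySem.Set.add, PySem.Set.contains, PySem.Set.empty, h]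

theorem nfaStep_q2 (c : Char) :
    nfaStep ["q2"] c = if c == '0' || c == '1' then ["q2"] else [] := by
  by_cases h0 : c = '0' <;> by_cases h1 : c = '1' <;>
    simp [nfaStep, PySem.Set.add, PySem.Set.contains, PySem.Set.empty, h0, h1]

theorem loop_q2 (l : List Char) :
    decide ("q2" ∈ l.foldl nfaStep ["q2"]) = l.all (fun c => c == '0' || c == '1') := by
  induction l with
  | nil => rfl
  | cons c l ih =>
    by_cases h : (c == '0' || c == '1') = true
    · simp only [List.foldl_cons, nfaStep_q2, h, if_pos]
      simp [ih, h]
    · simp [List.foldl_cons, nfaStep_q2, h, loop_empty]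

-- ===== VERDICT (by name: the statement is the Claim_ definition above) =====
theorem nfa_starts_with_01_spec : Claim_equal_nfa_starts_with_01 := by
  intro s _
  unfold Spec_nfa_starts_with_01 nfa_starts_with_01 nfa_starts_with_01_alt
  match hl : s.toList with
  | [] => rfl
  | [c] =>
    by_cases h : c = '0' <;>
      simp [List.foldl_cons, h, nfaStep, PySem.Set.contains,
        PySem.Set.ofList, PySem.Set.empty, PySem.Set.add]
  | c0 :: c1 :: rest =>
    by_cases h0 : c0 = '0'
    · by_cases h1 : c1 = '1'
      · simp [List.foldl_cons, nfaStep_q0, h0, nfaStep_q1, h1, loop_q2,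
          PySem.Set.ofList, PySem.Set.contains]
      · simp [List.foldl_cons, nfaStep_q0, h0, nfaStep_q1, h1, loop_empty,
          PySem.Set.ofList, PySem.Set.contains]
    · simp [List.foldl_cons, nfaStep_q0, h0, nfaStep_empty, loop_empty,
        PySem.Set.ofList, PySem.Set.contains]
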